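-- pv_equiv track=rewrite | github.com/jkvastad/MusicAnalysis | tunegen.py | sort_by_scientific_notation
-- ===== SOURCE A (Python) =====
-- from collections import defaultdict
--
-- TWELVE_TET_NAMES = ['C', 'C#', 'D', 'D#', 'E', 'F', 'F#', 'G', 'G#', 'A', 'A#', 'B']
--
-- def sort_by_scientific_notation(data_list):
--     def __sort_data():
--         for name in TWELVE_TET_NAMES:
--             for number in range(12):
--                 if name + str(number) in data[1]:
--                     sorted_data[name].append(data)
--                     return
--
--     sorted_data = defaultdict(list)
--     for data in data_list:
--         __sort_data()
--
--     return {name: sorted(sorted_data[name], key=lambda x: x[2]) for name in TWELVE_TET_NAMES}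
-- ===== SOURCE B (Python) =====
-- TWELVE_TET_NAMES = ['C', 'C#', 'D', 'D#', 'E', 'F', 'F#', 'G', 'G#', 'A', 'A#', 'B']
--
-- # flat table of all 144 candidate tokens, in A's (name, number) search order
-- _TOKENS = [(name + str(number), name) for name in TWELVE_TET_NAMES for number in range(12)]
--
-- def _classify(s):
--     for token, name in _TOKENS:
--         if token in s:
--             return name
--     return None
--
-- def sort_by_scientific_notation(data_list):
--     labeled = [(_classify(data[1]), data) for data in data_list]
--     return {name: sorted([data for label, data in labeled if label == name],
--                          key=lambda x: x[2])
--             for name in TWELVE_TET_NAMES}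
-- ===== Notes on version B (the rewrite author's own statement) =====
-- stated objective: simpler
-- what changed: Replaces A's nested name/number loops inside a closure appending into a defaultdict (then per-bucket sort) with a flat 144-token table precomputed once that labels each item in a single scan, followed by a filter per note name; no dict and no inner function.
import Mathlib
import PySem

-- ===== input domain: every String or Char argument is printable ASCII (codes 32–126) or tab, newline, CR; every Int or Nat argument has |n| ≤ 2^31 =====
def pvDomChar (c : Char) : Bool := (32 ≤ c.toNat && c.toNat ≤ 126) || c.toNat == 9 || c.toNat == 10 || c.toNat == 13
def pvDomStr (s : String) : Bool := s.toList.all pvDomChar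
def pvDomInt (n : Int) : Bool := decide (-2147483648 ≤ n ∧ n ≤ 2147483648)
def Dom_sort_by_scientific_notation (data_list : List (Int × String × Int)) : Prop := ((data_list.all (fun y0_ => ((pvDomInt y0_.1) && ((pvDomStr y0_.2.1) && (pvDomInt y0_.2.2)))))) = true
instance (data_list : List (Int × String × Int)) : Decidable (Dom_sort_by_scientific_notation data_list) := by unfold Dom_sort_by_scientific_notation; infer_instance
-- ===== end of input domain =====

-- B replaces A's defaultdict-append-then-sort with a flat 144-token table used to label each
-- item once, followed by a filter per note name (objective: simpler — no dict, no inner function).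

-- TWELVE_TET_NAMES (module-level constant shared by both versions)
def pyTwelveTetNames : List String := ["C", "C#", "D", "D#", "E", "F", "F#", "G", "G#", "A", "A#", "B"]

-- ===== PORT A =====
-- inner 'for number in range(12)' of __sort_data: true iff some token name+str(number) occurs in s
def aNumLoop (name : String) (s : String) : List Int → Bool
  | [] => false
  | n :: rest => if PySem.Str.isIn (name ++ PySem.Int.toStr n) s then true else aNumLoop name s rest

-- outer 'for name in TWELVE_TET_NAMES' of __sort_data: the bucket appended to (none = fall through)
def aNameLoop (s : String) : List String → Option String
  | [] => none
  | name :: rest => if aNumLoop name s (PySem.List.pyRange 0 12 1) then some name else aNameLoop s rest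

def sort_by_scientific_notation (data_list : List (Int × String × Int)) : List (String × List (Int × String × Int)) :=
  let sorted_data := data_list.foldl
    (fun d data =>
      match aNameLoop data.2.1 pyTwelveTetNames with
      | some name => d.insert name (d.getD name [] ++ [data])   -- defaultdict: sorted_data[name].append(data)
      | none => d)
    PySem.Dict.empty
  pyTwelveTetNames.map (fun name => (name, PySem.List.sorted (sorted_data.getD name []) (fun x => x.2.2) false))

-- ===== PORT B =====
-- _TOKENS: all 144 candidate tokens in A's search order
def bTokens : List (String × String) :=
  pyTwelveTetNames.flatMap (fun name => (PySem.List.pyRange 0 12 1).map (fun n => (name ++ PySem.Int.toStr n, name)))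

-- _classify: first token (in table order) occurring in s wins
def bClassifyLoop (s : String) : List (String × String) → Option String
  | [] => none
  | (tok, name) :: rest => if PySem.Str.isIn tok s then some name else bClassifyLoop s rest

def sort_by_scientific_notation_alt (data_list : List (Int × String × Int)) : List (String × List (Int × String × Int)) :=
  let labeled := data_list.map (fun data => (bClassifyLoop data.2.1 bTokens, data))
  -- Python's 'label == name' compares Optional[str] to str: true iff label is that str, so '== some name' is exact
  pyTwelveTetNames.map (fun name =>
    (name, PySem.List.sorted ((labeled.filter (fun p => p.1 == some name)).map (·.2)) (fun x => x.2.2) false))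

-- ===== PRECONDITION & SPEC =====
def Spec_sort_by_scientific_notation (data_list : List (Int × String × Int)) (out : List (String × List (Int × String × Int))) : Prop := out = sort_by_scientific_notation_alt data_list
instance (data_list : List (Int × String × Int)) (out : List (String × List (Int × String × Int))) : Decidable (Spec_sort_by_scientific_notation data_list out) := by unfold Spec_sort_by_scientific_notation; infer_instance

-- ===== CLAIM (what is proved, stated in full; the proofs are below) =====
def Claim_equal_sort_by_scientific_notation : Prop := ∀ (data_list : List (Int × String × Int)), Dom_sort_by_scientific_notation data_list → Spec_sort_by_scientific_notation data_list (sort_by_scientific_notation data_list)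

-- ===== LEMMAS AND PROOFS =====

-- B's scan of one name's 12-token block equals A's inner number loop (keyed to that name)
theorem bClassify_block (name s : String) (nums : List Int) :
    bClassifyLoop s (nums.map (fun n => (name ++ PySem.Int.toStr n, name)))
      = if aNumLoop name s nums then some name else none := by
  induction nums with
  | nil => simp [bClassifyLoop, aNumLoop]
  | cons n rest ih => simp only [List.map, bClassifyLoop, aNumLoop]; split_ifs <;> simp_all

theorem bClassify_append (s : String) (l1 l2 : List (String × String)) :
    bClassifyLoop s (l1 ++ l2) = (bClassifyLoop s l1).orElse (fun _ => bClassifyLoop s l2) := by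
  induction l1 with
  | nil => simp [bClassifyLoop]
  | cons p rest ih => cases p; simp only [List.cons_append, bClassifyLoop]; split_ifs <;> simp [ih]

-- B's classification over the flat token table equals A's nested loop
theorem classify_eq (s : String) : bClassifyLoop s bTokens = aNameLoop s pyTwelveTetNames := by
  show bClassifyLoop s (pyTwelveTetNames.flatMap _) = _
  induction pyTwelveTetNames with
  | nil => simp [bClassifyLoop, aNameLoop]
  | cons name rest ih =>
      simp only [List.flatMap_cons, aNameLoop, bClassify_append, bClassify_block]
      split_ifs <;> simp [ih]

-- A's bucket for 'name' after the fold is the filter of the input by its classification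
theorem bucket_eq (name : String) (l : List (Int × String × Int)) (d : PySem.Dict String (List (Int × String × Int))) :
    (l.foldl
      (fun d data =>
        match aNameLoop data.2.1 pyTwelveTetNames with
        | some name => d.insert name (d.getD name [] ++ [data])
        | none => d) d).getD name []
      = d.getD name [] ++ l.filter (fun x => aNameLoop x.2.1 pyTwelveTetNames == some name) := by
  induction l generalizing d with
  | nil => simp
  | cons data rest ih =>
      simp only [List.foldl_cons, List.filter_cons]
      cases h : aNameLoop data.2.1 pyTwelveTetNames with
      | none => simp [ih]
      | some m =>
          simp only [ih, PySem.Dict.getD_insert]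
          by_cases hm : name = m
          · simp [hm]
          · simp [hm, Ne.symm hm]

-- B's label-then-filter collapses to a plain filter of the input
theorem labeled_filter_eq (name : String) (l : List (Int × String × Int)) :
    ((l.map (fun data => (bClassifyLoop data.2.1 bTokens, data))).filter (fun p => p.1 == some name)).map (·.2)
      = l.filter (fun x => bClassifyLoop x.2.1 bTokens == some name) := by
  induction l with
  | nil => simp
  | cons data rest ih =>
      simp only [List.map_cons, List.filter_cons]
      by_cases h : bClassifyLoop data.2.1 bTokens == some name <;> simp [h, ih]

-- ===== VERDICT (by name: the statement is the Claim_ definition above) =====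
theorem sort_by_scientific_notation_spec : Claim_equal_sort_by_scientific_notation := by
  intro data_list _
  show sort_by_scientific_notation data_list = sort_by_scientific_notation_alt data_list
  simp only [sort_by_scientific_notation, sort_by_scientific_notation_alt, labeled_filter_eq]
  simp only [classify_eq, bucket_eq, PySem.Dict.getD_empty, List.nil_append]
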